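-- pv_equiv track=rewrite | github.com/posl/comment_recommendation | script/mod_gen/4_time/zh/208_A/8.py | dice_sum
-- ===== SOURCE A (Python) =====
-- def dice_sum(n, s):
--     if n == 1 and s <= 6:
--         return True
--     elif n == 1:
--         return False
--     else:
--         for i in range(1, 7):
--             if dice_sum(n-1, s-i):
--                 return True
--         return False
-- ===== SOURCE B (Python) =====
-- def dice_sum(n, s):
--     # A has no lower bound in its base case (n==1 accepts any s <= 6),
--     # so the recursion succeeds exactly when s <= 6*n.
--     return s <= 6 * n
-- ===== Notes on version B (the rewrite author's own statement) =====
-- stated objective: faster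
-- what changed: Replaces the 6-way exponential recursion with the closed-form test s <= 6*n (exact, since A's base case has no lower bound on s); intended as faster (O(1) vs O(6^n)): a timing run saw A time out on moderate n where B returned, but could not confirm a ratio since at the sizes A finishes it is already sub-millisecond.
import Mathlib
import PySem

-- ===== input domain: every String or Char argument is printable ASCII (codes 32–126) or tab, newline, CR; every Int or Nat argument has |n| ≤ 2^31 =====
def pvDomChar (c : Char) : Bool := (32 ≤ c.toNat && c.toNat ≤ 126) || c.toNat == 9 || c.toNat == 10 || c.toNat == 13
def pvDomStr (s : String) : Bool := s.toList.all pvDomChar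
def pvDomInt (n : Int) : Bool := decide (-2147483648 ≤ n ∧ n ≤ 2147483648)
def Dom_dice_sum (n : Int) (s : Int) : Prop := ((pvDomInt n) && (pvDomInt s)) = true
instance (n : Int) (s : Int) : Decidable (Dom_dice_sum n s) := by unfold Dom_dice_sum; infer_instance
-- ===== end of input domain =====

-- B replaces A's 6-way exponential recursion with the closed-form test s <= 6*n (exact, since
-- A's base case n==1 accepts every s <= 6 with no lower bound); proved equivalent for n >= 1.


-- ===== PORT A =====
-- fuel = n.toNat; on Pre_ (1 ≤ n) the fuel exactly covers the recursion depth (n decreases by 1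
-- each call and the base case fires at n == 1), so the fuel-out `0` case is never reached there;
-- each step mirrors A's code line by line; the for-loop over the constant range(1,7) = [1,..,6]
-- with early return is unrolled into the same six recursive calls in the same order with
-- short-circuit || (= the early return).
def diceSumA : Nat → Int → Int → Bool
  | 0, _, _ => false
  | fuel+1, n, s =>
    if n == 1 && decide (s ≤ 6) then true
    else if n == 1 then false
    else
      diceSumA fuel (n-1) (s-1) || diceSumA fuel (n-1) (s-2) || diceSumA fuel (n-1) (s-3) ||
      diceSumA fuel (n-1) (s-4) || diceSumA fuel (n-1) (s-5) || diceSumA fuel (n-1) (s-6)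

def dice_sum (n : Int) (s : Int) : Bool := diceSumA n.toNat n s

-- ===== PORT B =====
def dice_sum_alt (n : Int) (s : Int) : Bool := decide (s ≤ 6 * n)

-- ===== PRECONDITION & SPEC =====
-- For n ≤ 0 the Python A recurses with no base case and raises RecursionError.
def Pre_dice_sum (n : Int) (s : Int) : Prop := 1 ≤ n
instance (n : Int) (s : Int) : Decidable (Pre_dice_sum n s) := by unfold Pre_dice_sum; infer_instance
def pvWitness_dice_sum : Int × Int := (2, 7)

def Spec_dice_sum (n : Int) (s : Int) (out : Bool) : Prop := out = dice_sum_alt n s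
instance (n : Int) (s : Int) (out : Bool) : Decidable (Spec_dice_sum n s out) := by unfold Spec_dice_sum; infer_instance

-- ===== CLAIM (what is proved, stated in full; the proofs are below) =====
def Claim_equal_dice_sum : Prop := ∀ (n : Int) (s : Int), Dom_dice_sum n s → Pre_dice_sum n s → Spec_dice_sum n s (dice_sum n s)

-- ===== LEMMAS AND PROOFS =====
-- With fuel k+1 and n = k+1 (the shape dice_sum produces when 1 ≤ n), A's recursion decides s ≤ 6n.
lemma diceSumA_eq (k : Nat) : ∀ s : Int,
    diceSumA (k+1) ((k : Int)+1) s = decide (s ≤ 6 * ((k : Int)+1)) := by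
  induction k with
  | zero => intro s; simp [diceSumA]
  | succ m ih =>
    intro s
    rw [diceSumA]
    rw [if_neg (by simp; omega), if_neg (by simp; omega)]
    rw [show ((m+1 : Nat) : Int) + 1 - 1 = (m : Int) + 1 by push_cast; ring]
    rw [ih (s-1), ih (s-2), ih (s-3), ih (s-4), ih (s-5), ih (s-6)]
    simp only [← Bool.decide_or]
    apply decide_eq_decide.mpr
    constructor <;> intro h <;> omega

-- ===== VERDICT (by name: the statement is the Claim_ definition above) =====
theorem dice_sum_spec : Claim_equal_dice_sum := by
  intro n s _ hpre
  unfold Spec_dice_sum dice_sum dice_sum_alt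
  obtain ⟨k, hk⟩ : ∃ k : Nat, n = (k : Int) + 1 := ⟨(n-1).toNat, by unfold Pre_dice_sum at hpre; omega⟩
  subst hk
  rw [show ((k : Int) + 1).toNat = k + 1 by omega]
  exact diceSumA_eq k s
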